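-- pv_equiv track=rewrite | github.com/neurobrko/SyncSuite | common.py | get_all_maps
-- ===== SOURCE A (Python) =====
-- class RepeatingKeyError(Exception):
--     pass
--
-- def get_all_maps(filemap: dict) -> dict:
--     all_maps = {}
--     for task_name, maps in filemap.items():
--         for key, value in maps.items():
--             if key in all_maps:
--                 raise RepeatingKeyError(
--                     f"Repeating keys in task '{task_name}'"
--                 )
--             all_maps[key] = value
--     return all_maps
-- ===== SOURCE B (Python) =====
-- class RepeatingKeyError(Exception):
--     pass
--
-- def get_all_maps(filemap: dict) -> dict:
--     # Stage 1: merge everything unconditionally with a flat dict comprehension.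
--     merged = {key: value for maps in filemap.values() for key, value in maps.items()}
--     # Stage 2: validate by counting; a shortfall means some key repeated.
--     if len(merged) != sum(len(maps) for maps in filemap.values()):
--         # Locate the first offending task for the error message.
--         seen = set()
--         for task_name, maps in filemap.items():
--             if not seen.isdisjoint(maps):
--                 raise RepeatingKeyError(f"Repeating keys in task '{task_name}'")
--             seen.update(maps)
--     return merged
-- ===== Notes on version B (the rewrite author's own statement) =====
-- stated objective: alternative
-- what changed: A checks each key for duplication while merging incrementally; B merges everything first in one flat dict comprehension, then validates by comparing the merged size against the total key count, only scanning for the offending task when the counts disagree.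
import Mathlib
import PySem

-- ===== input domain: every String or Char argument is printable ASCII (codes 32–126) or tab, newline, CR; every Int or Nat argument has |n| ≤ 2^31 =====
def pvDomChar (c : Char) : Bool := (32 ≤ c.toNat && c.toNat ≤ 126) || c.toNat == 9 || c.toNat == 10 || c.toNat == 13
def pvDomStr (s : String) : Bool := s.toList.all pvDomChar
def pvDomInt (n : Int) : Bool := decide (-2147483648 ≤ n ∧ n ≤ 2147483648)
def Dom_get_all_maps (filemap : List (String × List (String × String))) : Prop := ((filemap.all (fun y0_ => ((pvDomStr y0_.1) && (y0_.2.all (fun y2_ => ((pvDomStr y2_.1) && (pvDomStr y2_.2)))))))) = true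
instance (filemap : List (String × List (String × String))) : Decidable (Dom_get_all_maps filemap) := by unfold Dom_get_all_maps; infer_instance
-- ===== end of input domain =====

-- B merges everything first with one flat dict comprehension, then validates by comparing the
-- merged size with the total key count, locating the offending task only on failure (alternative
-- decomposition, not faster); A checks each key while merging incrementally.

-- ===== PORT A =====
-- inner 'for key, value in maps.items()' loop; none models the RepeatingKeyError raise
def pvAInner (all_maps : PySem.Dict String String) : List (String × String) → Option (PySem.Dict String String)
  | [] => some all_maps
  | (key, value) :: rest =>
      if all_maps.contains key then none
      else pvAInner (all_maps.insert key value) rest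

-- outer 'for task_name, maps in filemap.items()' loop
def pvALoop (all_maps : PySem.Dict String String) : List (String × List (String × String)) → Option (PySem.Dict String String)
  | [] => some all_maps
  | (_, maps) :: rest =>
      match pvAInner all_maps maps with
      | none => none
      | some d => pvALoop d rest

def get_all_maps (filemap : List (String × List (String × String))) : List (String × String) :=
  match pvALoop PySem.Dict.empty filemap with
  | some d => d.items
  | none => []          -- unreachable under Pre_ (Python raises RepeatingKeyError here)

-- ===== PORT B =====
-- '{key: value for maps in filemap.values() for key, value in maps.items()}'
def pvBMerged (filemap : List (String × List (String × String))) : PySem.Dict String String :=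
  (filemap.flatMap (fun p => p.2)).foldl (fun d kv => d.insert kv.1 kv.2) PySem.Dict.empty

-- 'sum(len(maps) for maps in filemap.values())'
def pvBTotal (filemap : List (String × List (String × String))) : Nat :=
  (filemap.map (fun p => p.2.length)).sum

-- the error-locating loop: 'seen = set(); for task_name, maps in …: if not seen.isdisjoint(maps): raise; seen.update(maps)'
def pvBFind (seen : PySem.Set String) : List (String × List (String × String)) → Bool
  | [] => false
  | (_, maps) :: rest =>
      if !(PySem.Set.isdisjoint seen (maps.map Prod.fst)) then true
      else pvBFind (PySem.Set.update seen (maps.map Prod.fst)) rest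

def get_all_maps_alt (filemap : List (String × List (String × String))) : List (String × String) :=
  let merged := pvBMerged filemap
  if merged.size ≠ pvBTotal filemap then
    if pvBFind PySem.Set.empty filemap then []   -- unreachable under Pre_ (Python raises here)
    else merged.items
  else merged.items

-- ===== PRECONDITION & SPEC =====
-- Pre_ excludes exactly the inputs on which Python A raises RepeatingKeyError: those where some
-- key occurs twice across the concatenated task maps (B raises the same exception there).
def Pre_get_all_maps (filemap : List (String × List (String × String))) : Prop :=
  ((filemap.flatMap (fun p => p.2)).map Prod.fst).Nodup

instance (filemap : List (String × List (String × String))) : Decidable (Pre_get_all_maps filemap) := by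
  unfold Pre_get_all_maps; infer_instance

def pvWitness_get_all_maps : (List (String × List (String × String))) :=
  [("task1", [("a", "1"), ("b", "2")]), ("task2", [("c", "3")])]

def Spec_get_all_maps (filemap : List (String × List (String × String))) (out : List (String × String)) : Prop := out = get_all_maps_alt filemap
instance (filemap : List (String × List (String × String))) (out : List (String × String)) : Decidable (Spec_get_all_maps filemap out) := by unfold Spec_get_all_maps; infer_instance

-- ===== CLAIM (what is proved, stated in full; the proofs are below) =====
def Claim_equal_get_all_maps : Prop := ∀ (filemap : List (String × List (String × String))), Dom_get_all_maps filemap → Pre_get_all_maps filemap → Spec_get_all_maps filemap (get_all_maps filemap)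

-- ===== LEMMAS AND PROOFS =====

theorem pvAInner_eq_update (maps : List (String × String)) (d : PySem.Dict String String)
    (hnd : (maps.map Prod.fst).Nodup) (hdisj : ∀ k ∈ maps.map Prod.fst, k ∉ d.keys) :
    pvAInner d maps = some (d.update maps) := by
  induction maps generalizing d with
  | nil => rfl
  | cons p rest ih =>
      obtain ⟨k, v⟩ := p
      have hk : k ∉ d.keys := hdisj k (by simp)
      have hc : d.contains k = false := by
        simp [PySem.Dict.contains_eq_decide_mem_keys, hk]
      have hnd' : (k :: rest.map Prod.fst).Nodup := by simpa only [List.map_cons] using hnd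
      have hkrest : k ∉ rest.map Prod.fst := (List.nodup_cons.1 hnd').1
      have hstep : ∀ k' ∈ rest.map Prod.fst, k' ∉ (d.insert k v).keys := by
        intro k' hk' hmem
        rcases (PySem.Dict.mem_keys_insert d k k' v).1 hmem with h | h
        · exact hkrest (h ▸ hk')
        · exact hdisj k' (by simp [hk']) h
      simp only [pvAInner, hc, Bool.false_eq_true, if_false]
      rw [ih (d.insert k v) (List.nodup_cons.1 hnd').2 hstep]
      rfl

theorem pvKeys_update (maps : List (String × String)) (d : PySem.Dict String String)
    (hnd : (maps.map Prod.fst).Nodup) (hdisj : ∀ k ∈ maps.map Prod.fst, k ∉ d.keys) :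
    (d.update maps).keys = d.keys ++ maps.map Prod.fst := by
  have h1 := PySem.Dict.keys_foldl_insert_key maps Prod.fst (fun dd a => a.2) d
  have hset : PySem.Set.update d.keys (maps.map Prod.fst) = d.keys ++ maps.map Prod.fst :=
    PySem.Set.update_eq_append_of_disjoint _ _ hnd hdisj
  calc (d.update maps).keys = PySem.Set.update d.keys (maps.map Prod.fst) := by
        simpa [PySem.Dict.update] using h1
    _ = d.keys ++ maps.map Prod.fst := hset

theorem pvALoop_eq (fm : List (String × List (String × String))) (d : PySem.Dict String String)
    (h : (d.keys ++ (fm.flatMap (fun p => p.2)).map Prod.fst).Nodup) :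
    pvALoop d fm = some (d.update (fm.flatMap (fun p => p.2))) := by
  induction fm generalizing d with
  | nil => simp [pvALoop, PySem.Dict.update]
  | cons tp rest ih =>
      obtain ⟨t, maps⟩ := tp
      have hflat : ((t, maps) :: rest).flatMap (fun p => p.2) = maps ++ rest.flatMap (fun p => p.2) := by
        simp
      rw [hflat] at h ⊢
      rw [List.map_append, ← List.append_assoc] at h
      have h1 : ((d.keys ++ maps.map Prod.fst)).Nodup := (List.nodup_append.1 h).1
      have hdisj : ∀ k ∈ maps.map Prod.fst, k ∉ d.keys := by
        intro k hk hd
        exact (List.nodup_append.1 h1).2.2 k hd k hk rfl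
      have hkeys := pvKeys_update maps d (List.nodup_append.1 h1).2.1 hdisj
      have h' : ((d.update maps).keys ++ (rest.flatMap (fun p => p.2)).map Prod.fst).Nodup := by
        rw [hkeys]; exact h
      have hupd : (d.update maps).update (rest.flatMap (fun p => p.2)) =
          d.update (maps ++ rest.flatMap (fun p => p.2)) := by
        simp [PySem.Dict.update, List.foldl_append]
      rw [pvALoop, pvAInner_eq_update maps d (List.nodup_append.1 h1).2.1 hdisj]
      show pvALoop (d.update maps) rest = _
      rw [ih (d.update maps) h', hupd]

-- B's merged dict is exactly Dict.empty.update of the flattened pairs (definitionally)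
theorem pvBMerged_eq (fm : List (String × List (String × String))) :
    pvBMerged fm = PySem.Dict.empty.update (fm.flatMap (fun p => p.2)) := rfl

theorem pvBMerged_size (fm : List (String × List (String × String)))
    (hpre : ((fm.flatMap (fun p => p.2)).map Prod.fst).Nodup) :
    (pvBMerged fm).size = pvBTotal fm := by
  have hkeys : (pvBMerged fm).keys = (fm.flatMap (fun p => p.2)).map Prod.fst := by
    rw [pvBMerged_eq]
    have := pvKeys_update (fm.flatMap (fun p => p.2)) PySem.Dict.empty hpre
      (by intro k _ hk; simp [PySem.Dict.keys_empty] at hk)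
    simpa [PySem.Dict.keys_empty] using this
  have hsz : (pvBMerged fm).size = (pvBMerged fm).keys.length := by
    simp [PySem.Dict.size, PySem.Dict.keys]
  rw [hsz, hkeys]
  simp [pvBTotal, List.length_flatMap]

-- ===== VERDICT (by name: the statement is the Claim_ definition above) =====
theorem get_all_maps_spec : Claim_equal_get_all_maps := by
  intro fm _ hpre
  unfold Spec_get_all_maps get_all_maps get_all_maps_alt
  have h0 : (((PySem.Dict.empty : PySem.Dict String String)).keys ++ ((fm.flatMap (fun p => p.2)).map Prod.fst)).Nodup := by
    simpa [PySem.Dict.keys_empty] using hpre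
  rw [pvALoop_eq fm PySem.Dict.empty h0]
  have hs : (PySem.Dict.empty.update (fm.flatMap (fun p => p.2))).size = pvBTotal fm := by
    have h := pvBMerged_size fm hpre
    rwa [pvBMerged_eq] at h
  simp [pvBMerged_eq, hs]
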